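-- pv_equiv track=rewrite | github.com/kakao-harry-kr2/Algorithms | 05-May/20220507/2022_kakao_internship_5.py | solution_C
-- ===== SOURCE A (Python) =====
-- from collections import deque
--
-- def solution_C(rc, oprList):
--     R, C = len(rc), len(rc[0])
--     EDGE_LENGTH = 2 * R + 2 * C - 4
--     q = [deque(rc[r]) for r in range(R)]
--
--     for opr, cnt in oprList:
--         if opr == 'ShiftRow':
--             for _ in range(cnt%R):
--                 lastRow = q.pop()
--                 q.insert(0, lastRow)
--
--         else:
--             cnt_impl = cnt % EDGE_LENGTH
--             if cnt_impl < EDGE_LENGTH // 2: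
--                 for _ in range(cnt_impl):
--                     TopRightElement = q[0].pop()
--                     q[0].appendleft(None)
--                     for r in range(R-1):
--                         q[r][0] = q[r+1][0]
--                     q[-1].popleft()
--                     q[-1].append(None)
--                     for r in reversed(range(R-1)):
--                         q[r+1][-1] = q[r][-1]
--                     q[1][-1] = TopRightElement
--
--             else:
--                 for _ in range(EDGE_LENGTH - cnt_impl):
--                     TopLeftElement = q[0].popleft()
--                     q[0].append(None)
--                     for r in range(R-1):
--                         q[r][-1] = q[r+1][-1]
--                     q[-1].pop()
--                     q[-1].appendleft(None)
--                     for r in reversed(range(R-1)):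
--                         q[r+1][0] = q[r][0]
--                     q[1][0] = TopLeftElement
--
--     return [list(q[r]) for r in range(R)]
-- ===== SOURCE B (Python) =====
-- def solution_C(rc, oprList):
--     # One-pass net-offset rotation of rows / of the outer ring, instead of A's
--     # step-by-step deque simulation.
--     rows = [list(r) for r in rc]
--     R, C = len(rows), len(rows[0])
--     E = 2 * R + 2 * C - 4
--     for opr, cnt in oprList:
--         if opr == 'ShiftRow':
--             k = cnt % R
--             rows = rows[R - k:] + rows[:R - k]
--         else:
--             top, bottom, mid = rows[0], rows[-1], rows[1:-1]
--             # ring in clockwise order: top l->r, right col, bottom r->l, left col b->t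
--             ring = top + [r[-1] for r in mid] + bottom[::-1] + [r[0] for r in mid][::-1]
--             k = cnt % E
--             ring = ring[E - k:] + ring[:E - k]
--             top2 = ring[:C]
--             right = ring[C:C + R - 2]
--             bottom2 = ring[C + R - 2:C + R - 2 + C][::-1]
--             left = ring[C + R - 2 + C:][::-1]
--             rows = [top2] + [[l] + m[1:-1] + [rt] for l, m, rt in zip(left, mid, right)] + [bottom2]
--     return rows
-- ===== Notes on version B (the rewrite author's own statement) =====
-- stated objective: faster
-- what changed: B replaces A's step-by-step deque simulation (cnt single-cell shifts per operation, each touching the whole ring) by computing the net offset and rotating the rows list / the extracted outer ring by that offset in one slice-and-rebuild pass per operation.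
-- outside the precondition, e.g. on solution_C([[1, 2], [3]], [('Rotate', 1)]): A returns [[3, 1], [2]], B returns [[1, 2], [3]]; on solution_C([[1], [2]], [('Rotate', 1)]): A returns [[2], [1]], B returns [[2], [1]]; on solution_C([[1, 2, 3]], [('Rotate', 1)]): A raises IndexError, B returns [[3, 2, 1], [2, 1, 1]]
import Mathlib
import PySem

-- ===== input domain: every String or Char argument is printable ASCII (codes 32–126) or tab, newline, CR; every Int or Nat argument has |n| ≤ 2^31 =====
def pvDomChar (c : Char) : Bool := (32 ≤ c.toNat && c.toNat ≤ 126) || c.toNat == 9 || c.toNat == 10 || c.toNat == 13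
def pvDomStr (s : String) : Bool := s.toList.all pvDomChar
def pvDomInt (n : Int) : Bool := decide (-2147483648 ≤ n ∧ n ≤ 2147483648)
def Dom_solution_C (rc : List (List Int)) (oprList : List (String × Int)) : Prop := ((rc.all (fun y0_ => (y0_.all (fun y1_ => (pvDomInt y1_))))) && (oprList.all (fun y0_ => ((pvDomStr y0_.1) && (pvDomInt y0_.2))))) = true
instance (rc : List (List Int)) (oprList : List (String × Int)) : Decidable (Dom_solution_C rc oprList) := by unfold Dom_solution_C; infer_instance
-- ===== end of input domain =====

-- B rotates the rows list / the outer ring by the net offset in one slice-and-rebuild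
-- pass per operation, instead of A's step-by-step deque simulation (objective: faster).

-- ===== PORT A =====
-- q.pop(); q.insert(0, lastRow)
def pvRotRowA (q : List (List Int)) : List (List Int) :=
  q.getLastD [] :: q.dropLast

-- for r in range(R-1): q[r][0] = q[r+1][0]   (each row reads the next row's still-unchanged head)
def pvColUpA : List (List Int) → List (List Int)
  | x :: y :: rest => (x.set 0 (y.headD 0)) :: pvColUpA (y :: rest)
  | l => l

-- for r in reversed(range(R-1)): q[r+1][-1] = q[r][-1]  (each write reads the row above, not yet
-- modified by the loop; ported as a top-down pass carrying the previous row's old last element)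
def pvColDownAuxA (v : Int) : List (List Int) → List (List Int)
  | [] => []
  | y :: rest => y.set (y.length - 1) v :: pvColDownAuxA (y.getLastD 0) rest

-- for r in range(R-1): q[r][-1] = q[r+1][-1]
def pvColUpLastA : List (List Int) → List (List Int)
  | x :: y :: rest => (x.set (x.length - 1) (y.getLastD 0)) :: pvColUpLastA (y :: rest)
  | l => l

-- for r in reversed(range(R-1)): q[r+1][0] = q[r][0]
def pvColDownHeadAuxA (v : Int) : List (List Int) → List (List Int)
  | [] => []
  | y :: rest => y.set 0 v :: pvColDownHeadAuxA (y.headD 0) rest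

-- one clockwise ring step (the body of A's first inner rotation loop; the appended
-- None placeholders are always overwritten before they can be read, ported as 0)
def pvStepCW (q : List (List Int)) : List (List Int) :=
  let tr := (q.headD []).getLastD 0
  let q1 := q.set 0 (0 :: (q.headD []).dropLast)
  let q2 := pvColUpA q1
  let q3 := q2.set (q2.length - 1) ((q2.getLastD []).drop 1 ++ [0])
  let q4 := match q3 with
            | [] => []
            | x :: rest => x :: pvColDownAuxA (x.getLastD 0) rest
  let row1 := q4.getD 1 []
  q4.set 1 (row1.set (row1.length - 1) tr)          -- q[1][-1] = TopRightElement

-- one counter-clockwise ring step (the body of A's second inner rotation loop)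
def pvStepCCW (q : List (List Int)) : List (List Int) :=
  let tl := (q.headD []).headD 0
  let q1 := q.set 0 ((q.headD []).drop 1 ++ [0])
  let q2 := pvColUpLastA q1
  let q3 := q2.set (q2.length - 1) (0 :: (q2.getLastD []).dropLast)
  let q4 := match q3 with
            | [] => []
            | x :: rest => x :: pvColDownHeadAuxA (x.headD 0) rest
  let row1 := q4.getD 1 []
  q4.set 1 (row1.set 0 tl)                          -- q[1][0] = TopLeftElement

def pvApplyOpA (R E : Int) (q : List (List Int)) (op : String × Int) : List (List Int) :=
  if op.1 = "ShiftRow" then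
    pvRotRowA^[(PySem.Int.mod op.2 R).toNat] q
  else
    let cntImpl := PySem.Int.mod op.2 E
    if cntImpl < PySem.Int.floordiv E 2 then
      pvStepCW^[cntImpl.toNat] q
    else
      pvStepCCW^[(E - cntImpl).toNat] q

def solution_C (rc : List (List Int)) (oprList : List (String × Int)) : List (List Int) :=
  let R : Int := rc.length
  let C : Int := (rc.headD []).length
  let E : Int := 2 * R + 2 * C - 4
  oprList.foldl (pvApplyOpA R E) rc

-- ===== PORT B =====
-- ring = top + [r[-1] for r in mid] + bottom[::-1] + [r[0] for r in mid][::-1]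
def pvRing (t b : List Int) (ms : List (List Int)) : List Int :=
  t ++ ms.map (fun r => r.getLastD 0) ++ b.reverse ++ (ms.map (fun r => r.headD 0)).reverse

-- [top2] + [[l] + m[1:-1] + [rt] for l, m, rt in zip(left, mid, right)] + [bottom2]
def pvRebuild (C R : Nat) (ms : List (List Int)) (ring : List Int) : List (List Int) :=
  let top2 := ring.take C
  let right := (ring.drop C).take (R - 2)
  let bottom2 := ((ring.drop (C + (R - 2))).take C).reverse
  let left := (ring.drop (C + (R - 2) + C)).reverse
  top2 :: (List.zipWith (fun (lm : Int × List Int) rt => lm.1 :: ((lm.2.drop 1).dropLast ++ [rt]))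
            (left.zip ms) right) ++ [bottom2]

def pvApplyOpB (R C : Nat) (E : Int) (rows : List (List Int)) (op : String × Int) : List (List Int) :=
  if op.1 = "ShiftRow" then
    let k := (PySem.Int.mod op.2 (R : Int)).toNat
    rows.drop (R - k) ++ rows.take (R - k)
  else
    let ms := (rows.drop 1).dropLast
    let ring := pvRing (rows.headD []) (rows.getLastD []) ms
    let j := (E - PySem.Int.mod op.2 E).toNat
    pvRebuild C R ms (ring.drop j ++ ring.take j)

def solution_C_alt (rc : List (List Int)) (oprList : List (String × Int)) : List (List Int) :=
  let R := rc.length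
  let C := (rc.headD []).length
  let E : Int := 2 * (R : Int) + 2 * (C : Int) - 4
  oprList.foldl (pvApplyOpB R C E) rc

-- ===== PRECONDITION & SPEC =====
-- Pre_ excludes inputs where A raises (rc = [], a rotation with R = 1 or with a too-short row)
-- and, for inputs carrying a rotation op, ragged grids or grids with fewer than 2 rows/columns,
-- where A's ring walk reads cells outside the ring and its values are accidental artefacts of
-- the deque simulation.
def Pre_solution_C (rc : List (List Int)) (oprList : List (String × Int)) : Prop :=
  rc ≠ [] ∧ ((∀ op ∈ oprList, op.1 = "ShiftRow") ∨
    (2 ≤ rc.length ∧ 2 ≤ (rc.headD []).length ∧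
      ∀ row ∈ rc, row.length = (rc.headD []).length))

instance (rc : List (List Int)) (oprList : List (String × Int)) : Decidable (Pre_solution_C rc oprList) := by
  unfold Pre_solution_C; infer_instance

def pvWitness_solution_C : List (List Int) × (List (String × Int)) :=
  ([[1, 2, 3], [4, 5, 6], [7, 8, 9]], [("ShiftRow", 2), ("Rotate", 5)])

def Spec_solution_C (rc : List (List Int)) (oprList : List (String × Int)) (out : List (List Int)) : Prop := out = solution_C_alt rc oprList
instance (rc : List (List Int)) (oprList : List (String × Int)) (out : List (List Int)) : Decidable (Spec_solution_C rc oprList out) := by unfold Spec_solution_C; infer_instance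

-- ===== CLAIM (what is proved, stated in full; the proofs are below) =====
def Claim_equal_solution_C : Prop := ∀ (rc : List (List Int)) (oprList : List (String × Int)), Dom_solution_C rc oprList → Pre_solution_C rc oprList → Spec_solution_C rc oprList (solution_C rc oprList)

-- ===== LEMMAS AND PROOFS =====



-- small list lemmas
theorem pvSetLast {α : Type} (l : List α) (h : l ≠ []) (v : α) :
    l.set (l.length - 1) v = l.dropLast ++ [v] := by
  induction l with
  | nil => simp at h
  | cons a l ih =>
    cases l with
    | nil => simp
    | cons b l' =>
      simp only [List.length_cons, Nat.add_sub_cancel, List.set_cons_succ,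
        List.dropLast_cons₂, List.cons_append]
      have := ih (by simp)
      simp only [List.length_cons, Nat.add_sub_cancel] at this
      rw [this]

theorem pvDropLastCons {α : Type} (x : α) (l : List α) (h : l ≠ []) :
    (x :: l).dropLast = x :: l.dropLast := by
  cases l with
  | nil => simp at h
  | cons b l' => simp

theorem pvTakeLenSubOne {α : Type} (l : List α) : l.take (l.length - 1) = l.dropLast := by
  rw [List.dropLast_eq_take]

theorem pvDropLenSubOne {α : Type} (l : List α) (h : l ≠ []) (d : α) :
    l.drop (l.length - 1) = [l.getLastD d] := by
  induction l with
  | nil => simp at h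
  | cons a l ih =>
    cases l with
    | nil => simp
    | cons b l' =>
      simp only [List.length_cons, Nat.add_sub_cancel]
      have := ih (by simp)
      simp only [List.length_cons, Nat.add_sub_cancel] at this
      simpa [List.getLastD] using this

theorem pvRotLast {α : Type} (l : List α) (h : l ≠ []) (d : α) :
    l.rotate (l.length - 1) = l.getLastD d :: l.dropLast := by
  rw [List.rotate_eq_drop_append_take (by omega), pvDropLenSubOne l h d, pvTakeLenSubOne]
  simp

theorem pvRotOne {α : Type} (x : α) (l : List α) :
    (x :: l).rotate 1 = l ++ [x] := by
  rw [List.rotate_eq_drop_append_take (by simp)]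
  simp

theorem pvDropLastReverse {α : Type} (l : List α) : l.reverse.dropLast = (l.drop 1).reverse := by
  cases l with
  | nil => simp
  | cons a l' => simp

theorem pvGetLastDConcat {α : Type} (l : List α) (a d : α) : (l ++ [a]).getLastD d = a := by
  rw [List.getLastD_eq_getLast?, List.getLast?_concat]
  rfl

-- characterisations of A's column-shift loops
theorem pvColUpA_char : ∀ (l : List (List Int)) (x : List Int),
    pvColUpA (x :: l) =
      (List.zipWith (fun m nx => m.set 0 (nx.headD 0)) ((x :: l).dropLast) l) ++ [(x :: l).getLastD []] := by
  intro l
  induction l with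
  | nil => intro x; simp [pvColUpA]
  | cons y l' ih =>
    intro x
    rw [show pvColUpA (x :: y :: l') = (x.set 0 (y.headD 0)) :: pvColUpA (y :: l') from rfl, ih y]
    simp [List.getLastD]

theorem pvColDownAuxA_char : ∀ (l : List (List Int)) (v : Int),
    pvColDownAuxA v l =
      List.zipWith (fun m w => m.set (m.length - 1) w) l (v :: l.map (fun r => r.getLastD 0)) := by
  intro l
  induction l with
  | nil => intro v; simp [pvColDownAuxA]
  | cons y l' ih => intro v; simp [pvColDownAuxA, ih]

theorem pvColUpLastA_char : ∀ (l : List (List Int)) (x : List Int),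
    pvColUpLastA (x :: l) =
      (List.zipWith (fun m nx => m.set (m.length - 1) (nx.getLastD 0)) ((x :: l).dropLast) l) ++ [(x :: l).getLastD []] := by
  intro l
  induction l with
  | nil => intro x; simp [pvColUpLastA]
  | cons y l' ih =>
    intro x
    rw [show pvColUpLastA (x :: y :: l') = (x.set (x.length - 1) (y.getLastD 0)) :: pvColUpLastA (y :: l') from rfl, ih y]
    simp [List.getLastD]

theorem pvColDownHeadAuxA_char : ∀ (l : List (List Int)) (v : Int),
    pvColDownHeadAuxA v l =
      List.zipWith (fun m w => m.set 0 w) l (v :: l.map (fun r => r.headD 0)) := by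
  intro l
  induction l with
  | nil => intro v; simp [pvColDownHeadAuxA]
  | cons y l' ih => intro v; simp [pvColDownHeadAuxA, ih]
-- a three-list zip used as the common normal form of the middle rows
def pvZip3 (f : Int → List Int → Int → List Int) :
    List Int → List (List Int) → List Int → List (List Int)
  | h :: hs, m :: ms, w :: ws => f h m w :: pvZip3 f hs ms ws
  | _, _, _ => []

theorem pvZipWith_zip_eq_zip3 (f : Int → List Int → Int → List Int) :
    ∀ (ls : List Int) (ms : List (List Int)) (ws : List Int),
    List.zipWith (fun (lm : Int × List Int) rt => f lm.1 lm.2 rt) (ls.zip ms) ws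
      = pvZip3 f ls ms ws := by
  intro ls
  induction ls with
  | nil => intro ms ws; cases ms <;> cases ws <;> rfl
  | cons a ls ih =>
    intro ms ws
    cases ms with
    | nil => cases ws <;> rfl
    | cons m ms =>
      cases ws with
      | nil => rfl
      | cons w ws => simp only [List.zip_cons_cons, List.zipWith_cons_cons, ih, pvZip3]

theorem pvRowSet0SetLast (m : List Int) (h : 2 ≤ m.length) (hd w : Int) :
    (m.set 0 hd).set ((m.set 0 hd).length - 1) w = hd :: ((m.drop 1).dropLast ++ [w]) := by
  cases m with
  | nil => simp at h
  | cons a rest =>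
    have hr : rest ≠ [] := by
      intro he; subst he; simp at h
    simp only [List.set_cons_zero, List.length_cons, Nat.add_sub_cancel, List.drop_one,
      List.tail_cons]
    have hlen : rest.length = (rest.length - 1) + 1 := by
      cases rest with
      | nil => simp at hr
      | cons b t => simp
    rw [hlen, List.set_cons_succ, pvSetLast rest hr w]

-- the middle rows of one A-step, as a three-list zip
theorem pvMidsEq : ∀ (ms : List (List Int)) (hs ws : List Int), (∀ m ∈ ms, 2 ≤ m.length) →
    List.zipWith (fun m w => m.set (m.length - 1) w)
      (List.zipWith (fun m h => m.set 0 h) ms hs) ws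
    = pvZip3 (fun l m w => l :: ((m.drop 1).dropLast ++ [w])) hs ms ws := by
  intro ms
  induction ms with
  | nil => intro hs ws _; cases hs <;> cases ws <;> rfl
  | cons m ms ih =>
    intro hs ws hlen
    cases hs with
    | nil => cases ws <;> rfl
    | cons h hs =>
      cases ws with
      | nil => rfl
      | cons w ws =>
        simp only [List.zipWith_cons_cons, pvZip3]
        rw [pvRowSet0SetLast m (hlen m (by simp)) h w, ih hs ws (fun x hx => hlen x (by simp [hx]))]

-- the mirror: set last then set head
theorem pvRowSetLastSet0 (m : List Int) (h : 2 ≤ m.length) (hd w : Int) :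
    (m.set (m.length - 1) w).set 0 hd = hd :: ((m.drop 1).dropLast ++ [w]) := by
  cases m with
  | nil => simp at h
  | cons a rest =>
    have hr : rest ≠ [] := by
      intro he; subst he; simp at h
    have hlen : rest.length = (rest.length - 1) + 1 := by
      cases rest with
      | nil => simp at hr
      | cons b t => simp
    simp only [List.length_cons, Nat.add_sub_cancel]
    rw [hlen, List.set_cons_succ, List.set_cons_zero, pvSetLast rest hr w]
    simp

theorem pvMidsEq' : ∀ (ms : List (List Int)) (hs ws : List Int), (∀ m ∈ ms, 2 ≤ m.length) →
    List.zipWith (fun m h => m.set 0 h)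
      (List.zipWith (fun m w => m.set (m.length - 1) w) ms ws) hs
    = pvZip3 (fun l m w => l :: ((m.drop 1).dropLast ++ [w])) hs ms ws := by
  intro ms
  induction ms with
  | nil => intro hs ws _; cases hs <;> cases ws <;> rfl
  | cons m ms ih =>
    intro hs ws hlen
    cases hs with
    | nil => cases ws <;> rfl
    | cons h hs =>
      cases ws with
      | nil => rfl
      | cons w ws =>
        simp only [List.zipWith_cons_cons, pvZip3]
        rw [pvRowSetLastSet0 m (hlen m (by simp)) h w, ih hs ws (fun x hx => hlen x (by simp [hx]))]
theorem pvMapLastSet0 : ∀ (ms : List (List Int)) (hs : List Int), (∀ m ∈ ms, 2 ≤ m.length) →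
    hs.length = ms.length →
    (List.zipWith (fun m h => m.set 0 h) ms hs).map (fun r => r.getLastD 0)
      = ms.map (fun r => r.getLastD 0) := by
  intro ms
  induction ms with
  | nil => intro hs _ _; simp
  | cons m ms ih =>
    intro hs h2 hlen
    cases hs with
    | nil => simp at hlen
    | cons h hs =>
      simp only [List.zipWith_cons_cons, List.map_cons]
      have hm := h2 m (by simp)
      have hne : m ≠ [] := by intro he; subst he; simp at hm
      refine congrArg₂ (· :: ·) ?_ ?_
      · cases m with
        | nil => simp at hm
        | cons a rest =>
          cases rest with
          | nil => simp at hm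
          | cons b t => simp [List.getLastD]
      · exact ih hs (fun x hx => h2 x (by simp [hx])) (by simpa using hlen)

theorem pvMapHeadSetLast : ∀ (ms : List (List Int)) (ws : List Int), (∀ m ∈ ms, 2 ≤ m.length) →
    ws.length = ms.length →
    (List.zipWith (fun m w => m.set (m.length - 1) w) ms ws).map (fun r => r.headD 0)
      = ms.map (fun r => r.headD 0) := by
  intro ms
  induction ms with
  | nil => intro ws _ _; simp
  | cons m ms ih =>
    intro ws h2 hlen
    cases ws with
    | nil => simp at hlen
    | cons w ws =>
      simp only [List.zipWith_cons_cons, List.map_cons]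
      have hm := h2 m (by simp)
      refine congrArg₂ (· :: ·) ?_ ?_
      · cases m with
        | nil => simp at hm
        | cons a rest =>
          cases rest with
          | nil => simp at hm
          | cons b t => simp
      · exact ih ws (fun x hx => h2 x (by simp [hx])) (by simpa using hlen)

theorem pvZip3MapLast (f : Int → List Int → Int → List Int)
    (hf : ∀ l m w, (f l m w).getLastD 0 = w) :
    ∀ (hs : List Int) (ms : List (List Int)) (ws : List Int),
    hs.length = ms.length → ws.length = ms.length →
    (pvZip3 f hs ms ws).map (fun r => r.getLastD 0) = ws := by
  intro hs
  induction hs with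
  | nil => intro ms ws h1 h2; cases ms with
           | nil => cases ws with
                    | nil => rfl
                    | cons w ws => simp at h2
           | cons m ms => simp at h1
  | cons h hs ih =>
    intro ms ws h1 h2
    cases ms with
    | nil => simp at h1
    | cons m ms =>
      cases ws with
      | nil => simp at h2
      | cons w ws =>
        simp only [pvZip3, List.map_cons, hf]
        rw [ih ms ws (by simpa using h1) (by simpa using h2)]

theorem pvZip3MapHead (f : Int → List Int → Int → List Int)
    (hf : ∀ l m w, (f l m w).headD 0 = l) :
    ∀ (hs : List Int) (ms : List (List Int)) (ws : List Int),
    hs.length = ms.length → ws.length = ms.length →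
    (pvZip3 f hs ms ws).map (fun r => r.headD 0) = hs := by
  intro hs
  induction hs with
  | nil => intro ms ws h1 h2; cases ms with
           | nil => cases ws with
                    | nil => rfl
                    | cons w ws => simp at h2
           | cons m ms => simp at h1
  | cons h hs ih =>
    intro ms ws h1 h2
    cases ms with
    | nil => simp at h1
    | cons m ms =>
      cases ws with
      | nil => simp at h2
      | cons w ws =>
        simp only [pvZip3, List.map_cons, hf]
        rw [ih ms ws (by simpa using h1) (by simpa using h2)]

theorem pvZip3MapInterior :
    ∀ (hs : List Int) (ms : List (List Int)) (ws : List Int),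
    hs.length = ms.length → ws.length = ms.length →
    (pvZip3 (fun l m w => l :: ((m.drop 1).dropLast ++ [w])) hs ms ws).map
        (fun r => (r.drop 1).dropLast)
      = ms.map (fun r => (r.drop 1).dropLast) := by
  intro hs
  induction hs with
  | nil => intro ms ws h1 h2; cases ms with
           | nil => cases ws <;> rfl
           | cons m ms => simp at h1
  | cons h hs ih =>
    intro ms ws h1 h2
    cases ms with
    | nil => simp at h1
    | cons m ms =>
      cases ws with
      | nil => simp at h2
      | cons w ws =>
        simp only [pvZip3, List.map_cons, List.drop_succ_cons, List.drop_zero,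
          List.dropLast_concat]
        rw [ih ms ws (by simpa using h1) (by simpa using h2)]

theorem pvRowRecon (m : List Int) (h : 2 ≤ m.length) :
    m.headD 0 :: ((m.drop 1).dropLast ++ [m.getLastD 0]) = m := by
  cases m with
  | nil => simp at h
  | cons a rest =>
    cases rest with
    | nil => simp at h
    | cons b t =>
      simp only [List.headD_cons, List.drop_one, List.tail_cons, List.cons.injEq, true_and]
      rw [show (a :: b :: t).getLastD 0 = (b :: t).getLastD 0 from rfl]
      rw [show (b :: t).getLastD 0 = (b :: t).getLast (by simp) by
        rw [List.getLastD_eq_getLast?, List.getLast?_eq_some_getLast (by simp)]; rfl]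
      exact List.dropLast_append_getLast (by simp)

theorem pvZip3Recon : ∀ (ms : List (List Int)), (∀ m ∈ ms, 2 ≤ m.length) →
    pvZip3 (fun l m w => l :: ((m.drop 1).dropLast ++ [w]))
      (ms.map (fun r => r.headD 0)) ms (ms.map (fun r => r.getLastD 0)) = ms := by
  intro ms
  induction ms with
  | nil => intro _; rfl
  | cons m ms ih =>
    intro h2
    simp only [List.map_cons, pvZip3]
    rw [pvRowRecon m (h2 m (by simp)), ih (fun x hx => h2 x (by simp [hx]))]
-- helpers for getLastD over append
theorem pvGetLastDAppend {α : Type} (l₁ l₂ : List α) (h : l₂ ≠ []) (d : α) :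
    (l₁ ++ l₂).getLastD d = l₂.getLastD d := by
  rw [List.getLastD_eq_getLast?, List.getLastD_eq_getLast?]
  rw [List.getLast?_append_of_ne_nil (l₁ := l₁) h]

theorem pvGetLastDRev {α : Type} (l : List α) (h : l ≠ []) (d : α) :
    l.reverse.getLastD d = l.headD d := by
  cases l with
  | nil => simp at h
  | cons a l' => rw [List.reverse_cons, pvGetLastDConcat]; rfl

theorem pvDropLastAppend {α : Type} (l₁ l₂ : List α) (h : l₂ ≠ []) :
    (l₁ ++ l₂).dropLast = l₁ ++ l₂.dropLast := by
  induction l₁ with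
  | nil => rfl
  | cons a l ih =>
    cases l₂ with
    | nil => simp at h
    | cons b l' =>
      rw [List.cons_append, pvDropLastCons _ _ (by simp), ih, List.cons_append]

theorem pvStepCW_eq (C : Nat) (hC : 2 ≤ C) (t b : List Int) (ms : List (List Int))
    (ht : t.length = C) (hb : b.length = C) (hms : ∀ m ∈ ms, m.length = C) :
    pvStepCW (t :: (ms ++ [b])) =
      pvRebuild C (ms.length + 2) ms ((pvRing t b ms).rotate (2*C + 2*ms.length - 1)) := by
  have htne : t ≠ [] := by intro he; subst he; simp at ht; omega
  have hbne : b ≠ [] := by intro he; subst he; simp at hb; omega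
  have hdlt : t.dropLast ≠ [] := by
    intro he
    have := congrArg List.length he
    simp [ht] at this; omega
  cases ms with
  | nil =>
    -- R = 2 : the ring is  t ++ b.reverse
    simp only [List.nil_append, List.length_nil]
    have hq2 : pvColUpA [0 :: t.dropLast, b] = [b.headD 0 :: t.dropLast, b] := rfl
    have hb' : (b.drop 1 ++ [(0:Int)]).length = C := by
      simp [hb]; omega
    have hb'ne : b.drop 1 ++ [(0:Int)] ≠ [] := by simp
    have hset1 : ∀ v : Int, (b.drop 1 ++ [(0:Int)]).set ((b.drop 1 ++ [(0:Int)]).length - 1) v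
        = b.drop 1 ++ [v] := by
      intro v; rw [pvSetLast _ hb'ne v, List.dropLast_concat]
    have hset2 : ∀ v w : Int, (b.drop 1 ++ [v]).set ((b.drop 1 ++ [v]).length - 1) w
        = b.drop 1 ++ [w] := by
      intro v w; rw [pvSetLast _ (by simp) w, List.dropLast_concat]
    have hlhs : pvStepCW (t :: [b]) =
        [b.headD 0 :: t.dropLast, b.drop 1 ++ [t.getLastD 0]] := by
      simp only [pvStepCW, List.headD_cons, List.set_cons_zero, hq2]
      simp [pvColDownAuxA, List.getLastD]
    rw [hlhs]
    -- RHS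
    have hring : pvRing t b [] = t ++ b.reverse := by simp [pvRing]
    have hrne : t ++ b.reverse ≠ [] := by simp [htne]
    have hrot : (t ++ b.reverse).rotate (2 * C + 2 * 0 - 1)
        = b.headD 0 :: (t ++ b.reverse.dropLast) := by
      rw [show 2 * C + 2 * 0 - 1 = (t ++ b.reverse).length - 1 by simp [ht, hb]; omega,
        pvRotLast _ hrne 0, pvGetLastDAppend _ _ (by simp [hbne]) 0,
        pvGetLastDRev _ hbne 0, pvDropLastAppend _ _ (by simp [hbne])]
    rw [hring, hrot]
    -- unfold the rebuild
    have htake : (b.headD 0 :: (t ++ b.reverse.dropLast)).take C = b.headD 0 :: t.dropLast := by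
      cases C with
      | zero => omega
      | succ n =>
        simp only [List.take_succ_cons]
        rw [List.take_append_of_le_length (by omega)]
        rw [show n = t.length - 1 by omega, pvTakeLenSubOne]
    have hdrop : (b.headD 0 :: (t ++ b.reverse.dropLast)).drop C
        = t.getLastD 0 :: b.reverse.dropLast := by
      cases C with
      | zero => omega
      | succ n =>
        simp only [List.drop_succ_cons]
        rw [List.drop_append_of_le_length (by omega)]
        rw [show n = t.length - 1 by omega, pvDropLenSubOne t htne 0]
        rfl
    simp only [pvRebuild]
    rw [htake]
    simp only [show (0:Nat) + 2 - 2 = 0 from rfl, List.take_zero, List.zip_nil_right,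
      List.zipWith_nil_left]
    rw [show C + 0 = C by omega, hdrop]
    rw [List.take_of_length_le (by simp [hb]; omega)]
    simp only [List.reverse_cons, pvDropLastReverse, List.reverse_reverse]
    rfl
  | cons m0 ms' =>
    set ms : List (List Int) := m0 :: ms' with hmsdef
    have hk : 1 ≤ ms.length := by simp [hmsdef]
    have h2r : ∀ m ∈ ms, 2 ≤ m.length := fun m hm => (hms m hm) ▸ hC
    set nh : Int := m0.headD 0 with hnh
    set tr : Int := t.getLastD 0 with htr
    set Ml : List Int := ms.map (fun r => r.getLastD 0) with hMl
    set Mh : List Int := ms.map (fun r => r.headD 0) with hMh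
    set hs : List Int := ms'.map (fun r => r.headD 0) ++ [b.headD 0] with hhs
    have hMlLen : Ml.length = ms.length := by simp [hMl]
    have hMlne : Ml ≠ [] := by simp [hMl, hmsdef]
    have hhsLen : hs.length = ms.length := by simp [hhs, hmsdef]
    -- ===== LHS =====
    have hq2 : pvColUpA ((0 :: t.dropLast) :: (ms ++ [b])) =
        (nh :: t.dropLast) ::
          (List.zipWith (fun m nx => m.set 0 (nx.headD 0)) ms (ms' ++ [b]) ++ [b]) := by
      rw [pvColUpA_char (ms ++ [b]) (0 :: t.dropLast)]
      rw [pvDropLastCons _ _ (by simp), List.dropLast_concat]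
      rw [show ((0 :: t.dropLast) :: (ms ++ [b])).getLastD [] = b by
        rw [show ((0 :: t.dropLast) :: (ms ++ [b])) = ((0 :: t.dropLast) :: ms) ++ [b] by simp,
          pvGetLastDConcat]]
      rw [hmsdef, List.cons_append, List.zipWith_cons_cons, List.set_cons_zero]
      simp [hnh]
    have hmsU : List.zipWith (fun m nx => m.set 0 (nx.headD 0)) ms (ms' ++ [b])
        = List.zipWith (fun m h => m.set 0 h) ms hs := by
      rw [hhs, show ms'.map (fun r => r.headD 0) ++ [b.headD 0]
            = (ms' ++ [b]).map (fun r => r.headD 0) by simp]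
      exact (List.zipWith_map_right).symm
    set msU : List (List Int) := List.zipWith (fun m h => m.set 0 h) ms hs with hmsUdef
    have hmsULen : msU.length = ms.length := by simp [hmsUdef, hhsLen]
    have hmsUne : msU ≠ [] := by
      intro he
      have h1 := congrArg List.length he
      rw [hmsULen] at h1
      simp [hmsdef] at h1
    have hmsUlast : msU.map (fun r => r.getLastD 0) = Ml :=
      pvMapLastSet0 ms hs h2r hhsLen
    have hb'len : (b.drop 1 ++ [(0:Int)]).length = C := by simp [hb]; omega
    have hsetb' : ∀ v : Int, (b.drop 1 ++ [(0:Int)]).set ((b.drop 1 ++ [(0:Int)]).length - 1) v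
        = b.drop 1 ++ [v] := by
      intro v; rw [pvSetLast _ (by simp) v, List.dropLast_concat]
    -- companion split :  tr :: Ml ++ [0]  =  (tr :: Ml.dropLast) ++ [Ml.getLastD 0, 0]
    have hcomp : ∀ v : Int, v :: (Ml ++ [(0:Int)])
        = (v :: Ml.dropLast) ++ [Ml.getLastD 0, (0:Int)] := by
      intro v
      have : Ml = Ml.dropLast ++ [Ml.getLastD 0] := by
        rw [show Ml.getLastD 0 = Ml.getLast (by exact hMlne) by
              rw [List.getLastD_eq_getLast?, List.getLast?_eq_some_getLast hMlne]; rfl]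
        exact (List.dropLast_append_getLast hMlne).symm
      calc v :: (Ml ++ [(0:Int)]) = v :: ((Ml.dropLast ++ [Ml.getLastD 0]) ++ [(0:Int)]) := by
              rw [← this]
        _ = (v :: Ml.dropLast) ++ [Ml.getLastD 0, (0:Int)] := by simp
    have hlhs : pvStepCW (t :: (ms ++ [b])) =
        (nh :: t.dropLast) ::
          (pvZip3 (fun l m w => l :: ((m.drop 1).dropLast ++ [w])) hs ms (tr :: Ml.dropLast)
            ++ [b.drop 1 ++ [Ml.getLastD 0]]) := by
      simp only [pvStepCW, List.headD_cons, List.set_cons_zero, hq2, hmsU]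
      -- q3 : set the last row to b.drop 1 ++ [0]
      rw [show ((nh :: t.dropLast) :: (msU ++ [b])) = ((nh :: t.dropLast) :: msU) ++ [b] by simp]
      rw [pvGetLastDConcat]
      rw [show (((nh :: t.dropLast) :: msU) ++ [b]).length - 1
            = (((nh :: t.dropLast) :: msU) ++ [b]).length - 1 from rfl]
      rw [pvSetLast _ (by simp) _, List.dropLast_concat]
      rw [List.cons_append]
      rw [show (match (nh :: t.dropLast) :: (msU ++ [List.drop 1 b ++ [(0:Int)]]) with
            | [] => ([] : List (List Int))
            | x :: rest => x :: pvColDownAuxA (x.getLastD 0) rest)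
          = (nh :: t.dropLast) ::
              pvColDownAuxA ((nh :: t.dropLast).getLastD 0)
                (msU ++ [List.drop 1 b ++ [(0:Int)]]) from rfl]
      rw [pvColDownAuxA_char]
      rw [List.map_append, hmsUlast,
        show (List.map (fun r => r.getLastD 0) [List.drop 1 b ++ [(0:Int)]]) = [(0:Int)] by
          simp]
      -- decompose  hs  and  msU
      obtain ⟨h0, hs', hhs0⟩ : ∃ h0 hs', hs = h0 :: hs' := by
        cases hhs' : hs with
        | nil => rw [hhs'] at hhsLen; simp [hmsdef] at hhsLen
        | cons a l => exact ⟨a, l, rfl⟩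
      have hmsU0 : msU = (m0.set 0 h0) :: List.zipWith (fun m h => m.set 0 h) ms' hs' := by
        rw [hmsUdef, hmsdef, hhs0, List.zipWith_cons_cons]
      rw [hmsU0]
      simp only [List.cons_append, List.zipWith_cons_cons, List.set_cons_succ,
        List.set_cons_zero, List.getD_cons_succ, List.getD_cons_zero]
      simp only [List.length_set]
      rw [List.set_set]
      rw [show ((m0.set 0 h0).set (m0.length - 1) (t.getLastD 0) ::
               (List.zipWith (fun m w => m.set (m.length - 1) w)
                 (List.zipWith (fun m h => m.set 0 h) ms' hs' ++ [List.drop 1 b ++ [(0:Int)]])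
                 (Ml ++ [(0:Int)])))
          = List.zipWith (fun m w => m.set (m.length - 1) w)
              (((m0.set 0 h0) :: List.zipWith (fun m h => m.set 0 h) ms' hs')
                ++ [List.drop 1 b ++ [(0:Int)]])
              ((tr :: Ml) ++ [(0:Int)]) by simp [List.length_set, htr, List.getLastD_eq_getLast?]]
      rw [← hmsU0, show (tr :: Ml) ++ [(0:Int)] = tr :: (Ml ++ [(0:Int)]) by simp, hcomp tr]
      rw [List.zipWith_append (by simp [hmsULen, hMlLen, hmsdef])]
      rw [show List.zipWith (fun m w => m.set (m.length - 1) w)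
              [List.drop 1 b ++ [(0:Int)]] [Ml.getLastD 0, (0:Int)]
            = [(List.drop 1 b ++ [(0:Int)]).set ((List.drop 1 b ++ [(0:Int)]).length - 1)
                (Ml.getLastD 0)] from rfl, hsetb']
      rw [hmsUdef, pvMidsEq ms hs (tr :: Ml.dropLast) h2r]
    rw [hlhs]
    -- ===== RHS =====
    have hseg : ∀ (x : Int) (L Z : List Int) (n : Nat), L ≠ [] → n = L.length →
        ((x :: (L ++ Z)).take n = x :: L.dropLast ∧
          (x :: (L ++ Z)).drop n = L.getLastD 0 :: Z) := by
      intro x L Z n hL hn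
      have h1 : n = (L.length - 1) + 1 := by
        subst hn
        cases L with
        | nil => simp at hL
        | cons a l => simp
      constructor
      · rw [h1, List.take_succ_cons, List.take_append_of_le_length (by omega),
          pvTakeLenSubOne]
      · rw [h1, List.drop_succ_cons, List.drop_append_of_le_length (by omega),
          pvDropLenSubOne L hL 0, List.singleton_append]
    set Mh' : List Int := ms'.map (fun r => r.headD 0) with hMh'
    have hMh'rev : Mh.reverse ≠ [] := by simp [hMh, hmsdef]
    have hrgdef : pvRing t b ms = t ++ (Ml ++ (b.reverse ++ Mh.reverse)) := by
      simp [pvRing, hMl, hMh]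
    have hrglast : (pvRing t b ms).getLastD 0 = nh := by
      rw [hrgdef, pvGetLastDAppend _ _ (by simp [hMh'rev]) 0,
        pvGetLastDAppend _ _ (by simp [hMh'rev]) 0,
        pvGetLastDAppend _ _ hMh'rev 0, pvGetLastDRev _ (by simp [hMh, hmsdef]) 0]
      simp [hMh, hmsdef, hnh]
    have hrgdropLast : (pvRing t b ms).dropLast
        = t ++ (Ml ++ (b.reverse ++ Mh'.reverse)) := by
      rw [hrgdef, pvDropLastAppend _ _ (by simp [hMh'rev]),
        pvDropLastAppend _ _ (by simp [hMh'rev]), pvDropLastAppend _ _ hMh'rev,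
        pvDropLastReverse]
      simp [hMh, hMh', hmsdef]
    have hrglen : (pvRing t b ms).length = 2 * C + 2 * ms.length := by
      rw [hrgdef]; simp [ht, hb, hMl, hMh]; omega
    have hrot : (pvRing t b ms).rotate (2 * C + 2 * ms.length - 1)
        = nh :: (t ++ (Ml ++ (b.reverse ++ Mh'.reverse))) := by
      rw [show 2 * C + 2 * ms.length - 1 = (pvRing t b ms).length - 1 by rw [hrglen],
        pvRotLast _ (by intro he; rw [he] at hrglen; simp at hrglen; omega) 0,
        hrglast, hrgdropLast]
    rw [hrot]
    simp only [pvRebuild, Nat.add_sub_cancel]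
    -- the four segments
    have hTop := (hseg nh t (Ml ++ (b.reverse ++ Mh'.reverse)) C htne ht.symm).1
    have hDrop1 := (hseg nh t (Ml ++ (b.reverse ++ Mh'.reverse)) C htne ht.symm).2
    have hRight := (hseg (t.getLastD 0) Ml (b.reverse ++ Mh'.reverse) ms.length hMlne
      hMlLen.symm).1
    have hDrop2 := (hseg (t.getLastD 0) Ml (b.reverse ++ Mh'.reverse) ms.length hMlne
      hMlLen.symm).2
    have hbrevne : b.reverse ≠ [] := by simp [hbne]
    have hbrevlen : C = b.reverse.length := by simp [hb]
    have hBot := (hseg (Ml.getLastD 0) b.reverse Mh'.reverse C hbrevne hbrevlen).1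
    have hDrop3 := (hseg (Ml.getLastD 0) b.reverse Mh'.reverse C hbrevne hbrevlen).2
    rw [hTop, hDrop1]
    rw [show (t.getLastD 0 :: (Ml ++ (b.reverse ++ Mh'.reverse))).take ms.length
          = tr :: Ml.dropLast from hRight]
    rw [show (nh :: (t ++ (Ml ++ (b.reverse ++ Mh'.reverse)))).drop (C + ms.length)
          = Ml.getLastD 0 :: (b.reverse ++ Mh'.reverse) by
        rw [← List.drop_drop, hDrop1, hDrop2]]
    rw [hBot]
    rw [show (nh :: (t ++ (Ml ++ (b.reverse ++ Mh'.reverse)))).drop (C + ms.length + C)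
          = b.headD 0 :: Mh'.reverse by
        rw [← List.drop_drop (j := C + ms.length), ← List.drop_drop, hDrop1, hDrop2, hDrop3,
          pvGetLastDRev _ hbne 0]]
    rw [List.reverse_cons, List.reverse_cons, pvDropLastReverse, List.reverse_reverse,
      List.reverse_reverse]
    rw [show Mh' ++ [b.headD 0] = hs from rfl]
    rw [pvZipWith_zip_eq_zip3 (fun l m w => l :: ((m.drop 1).dropLast ++ [w])) hs ms
      (tr :: Ml.dropLast)]
    simp
theorem pvHeadDRev {α : Type} (l : List α) (h : l ≠ []) (d : α) :
    l.reverse.headD d = l.getLastD d := by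
  rw [← List.reverse_reverse l, pvGetLastDRev _ (by simpa using h) d, List.reverse_reverse]

theorem pvDropOneReverse {α : Type} (l : List α) (h : l ≠ []) :
    l.reverse.drop 1 = l.dropLast.reverse := by
  conv_lhs => rw [← List.dropLast_append_getLast h]
  rw [List.reverse_append]
  simp

theorem pvRotOneNe {α : Type} (l : List α) (h : l ≠ []) (d : α) :
    l.rotate 1 = l.drop 1 ++ [l.headD d] := by
  cases l with
  | nil => simp at h
  | cons a l' => rw [pvRotOne]; rfl

theorem pvHeadDAppend {α : Type} (l₁ l₂ : List α) (h : l₁ ≠ []) (d : α) :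
    (l₁ ++ l₂).headD d = l₁.headD d := by
  cases l₁ with
  | nil => simp at h
  | cons a l => rfl

-- segment extraction where the cut point is one past a block
theorem pvSeg2 (P Q : List Int) (n : Nat) (hn : n = P.length + 1) (hQ : Q ≠ []) :
    (P ++ Q).take n = P ++ [Q.headD 0] ∧ (P ++ Q).drop n = Q.drop 1 := by
  constructor
  · rw [hn, List.take_append]
    rw [List.take_of_length_le (by omega), show P.length + 1 - P.length = 1 by omega,
      List.take_one]
    cases Q with
    | nil => simp at hQ
    | cons q Q' => simp
  · rw [hn, List.drop_append]
    rw [List.drop_of_length_le (by omega), show P.length + 1 - P.length = 1 by omega]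
    simp

theorem pvStepCCW_eq (C : Nat) (hC : 2 ≤ C) (t b : List Int) (ms : List (List Int))
    (ht : t.length = C) (hb : b.length = C) (hms : ∀ m ∈ ms, m.length = C) :
    pvStepCCW (t :: (ms ++ [b])) =
      pvRebuild C (ms.length + 2) ms ((pvRing t b ms).rotate 1) := by
  have htne : t ≠ [] := by intro he; subst he; simp at ht; omega
  have hbne : b ≠ [] := by intro he; subst he; simp at hb; omega
  have hdt : t.drop 1 ≠ [] := by
    intro he
    have := congrArg List.length he
    simp [ht] at this; omega
  cases ms with
  | nil =>
    simp only [List.nil_append, List.length_nil]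
    have hx0 : (t.drop 1 ++ [(0:Int)]).set ((t.drop 1 ++ [(0:Int)]).length - 1) (b.getLastD 0)
        = t.drop 1 ++ [b.getLastD 0] := by
      rw [pvSetLast _ (by simp) _, List.dropLast_concat]
    have hq2 : pvColUpLastA [t.drop 1 ++ [(0:Int)], b]
        = [t.drop 1 ++ [b.getLastD 0], b] := by
      rw [show pvColUpLastA [t.drop 1 ++ [(0:Int)], b]
            = ((t.drop 1 ++ [(0:Int)]).set ((t.drop 1 ++ [(0:Int)]).length - 1) (b.getLastD 0))
                :: pvColUpLastA [b] from rfl, hx0]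
      rfl
    have hlhs : pvStepCCW (t :: [b]) =
        [t.drop 1 ++ [b.getLastD 0], t.headD 0 :: b.dropLast] := by
      simp only [pvStepCCW, List.headD_cons, List.set_cons_zero, hq2]
      simp [pvColDownHeadAuxA, List.getLastD]
    rw [hlhs]
    have hring : pvRing t b [] = t ++ b.reverse := by simp [pvRing]
    have hrot : (t ++ b.reverse).rotate 1 = t.drop 1 ++ (b.reverse ++ [t.headD 0]) := by
      rw [pvRotOneNe _ (by simp [htne]) 0, List.drop_append_of_le_length (by omega),
        pvHeadDAppend _ _ htne, List.append_assoc]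
    rw [hring, hrot]
    have hTop := (pvSeg2 (t.drop 1) (b.reverse ++ [t.headD 0]) C
      (by rw [List.length_drop, ht]; omega) (by simp)).1
    have hDrop1 := (pvSeg2 (t.drop 1) (b.reverse ++ [t.headD 0]) C
      (by rw [List.length_drop, ht]; omega) (by simp)).2
    simp only [pvRebuild]
    rw [show (0:Nat) + 2 - 2 = 0 from rfl, hTop]
    rw [pvHeadDAppend _ _ (by simp [hbne]) 0, pvHeadDRev _ hbne 0]
    rw [show C + 0 = C by omega]
    rw [show (List.drop 1 t ++ (b.reverse ++ [t.headD 0])).drop C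
          = b.reverse.drop 1 ++ [t.headD 0] by
        rw [hDrop1, List.drop_append_of_le_length
          (by rw [List.length_reverse, hb]; omega)]]
    rw [show List.take C (b.reverse.drop 1 ++ [t.headD 0]) = b.reverse.drop 1 ++ [t.headD 0]
          from List.take_of_length_le (by
            rw [List.length_append, List.length_drop, List.length_reverse, hb,
              List.length_singleton]; omega)]
    rw [List.reverse_append, pvDropOneReverse _ hbne, List.reverse_reverse]
    simp
  | cons m0 ms' =>
    set ms : List (List Int) := m0 :: ms' with hmsdef
    have h2r : ∀ m ∈ ms, 2 ≤ m.length := fun m hm => (hms m hm) ▸ hC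
    set tl : Int := t.headD 0 with htl
    set Ml : List Int := ms.map (fun r => r.getLastD 0) with hMl
    set Mh : List Int := ms.map (fun r => r.headD 0) with hMh
    set ws : List Int := ms'.map (fun r => r.getLastD 0) ++ [b.getLastD 0] with hws
    have hMhLen : Mh.length = ms.length := by simp [hMh]
    have hMhne : Mh ≠ [] := by simp [hMh, hmsdef]
    have hwsLen : ws.length = ms.length := by simp [hws, hmsdef]
    -- ===== LHS =====
    have hx0 : (t.drop 1 ++ [(0:Int)]).set ((t.drop 1 ++ [(0:Int)]).length - 1) (m0.getLastD 0)
        = t.drop 1 ++ [m0.getLastD 0] := by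
      rw [pvSetLast _ (by simp) _, List.dropLast_concat]
    have hq2 : pvColUpLastA ((t.drop 1 ++ [(0:Int)]) :: (ms ++ [b])) =
        (t.drop 1 ++ [m0.getLastD 0]) ::
          (List.zipWith (fun m nx => m.set (m.length - 1) (nx.getLastD 0)) ms (ms' ++ [b])
            ++ [b]) := by
      rw [pvColUpLastA_char (ms ++ [b]) (t.drop 1 ++ [(0:Int)])]
      rw [pvDropLastCons _ _ (by simp), List.dropLast_concat]
      rw [show ((t.drop 1 ++ [(0:Int)]) :: (ms ++ [b])).getLastD [] = b by
        rw [show ((t.drop 1 ++ [(0:Int)]) :: (ms ++ [b]))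
              = ((t.drop 1 ++ [(0:Int)]) :: ms) ++ [b] by simp, pvGetLastDConcat]]
      rw [hmsdef, List.cons_append, List.zipWith_cons_cons, hx0]
      simp
    have hmsU : List.zipWith (fun m nx => m.set (m.length - 1) (nx.getLastD 0)) ms (ms' ++ [b])
        = List.zipWith (fun m w => m.set (m.length - 1) w) ms ws := by
      rw [hws, show ms'.map (fun r => r.getLastD 0) ++ [b.getLastD 0]
            = (ms' ++ [b]).map (fun r => r.getLastD 0) by simp]
      exact (List.zipWith_map_right).symm
    set msU : List (List Int) := List.zipWith (fun m w => m.set (m.length - 1) w) ms ws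
      with hmsUdef
    have hmsULen : msU.length = ms.length := by simp [hmsUdef, hwsLen]
    have hmsUhead : msU.map (fun r => r.headD 0) = Mh :=
      pvMapHeadSetLast ms ws h2r hwsLen
    have hcomp : ∀ v : Int, v :: (Mh ++ [(0:Int)])
        = (v :: Mh.dropLast) ++ [Mh.getLastD 0, (0:Int)] := by
      intro v
      have : Mh = Mh.dropLast ++ [Mh.getLastD 0] := by
        rw [show Mh.getLastD 0 = Mh.getLast (by exact hMhne) by
              rw [List.getLastD_eq_getLast?, List.getLast?_eq_some_getLast hMhne]; rfl]
        exact (List.dropLast_append_getLast hMhne).symm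
      calc v :: (Mh ++ [(0:Int)]) = v :: ((Mh.dropLast ++ [Mh.getLastD 0]) ++ [(0:Int)]) := by
              rw [← this]
        _ = (v :: Mh.dropLast) ++ [Mh.getLastD 0, (0:Int)] := by simp
    have hlhs : pvStepCCW (t :: (ms ++ [b])) =
        (t.drop 1 ++ [m0.getLastD 0]) ::
          (pvZip3 (fun l m w => l :: ((m.drop 1).dropLast ++ [w])) (tl :: Mh.dropLast) ms ws
            ++ [Mh.getLastD 0 :: b.dropLast]) := by
      simp only [pvStepCCW, List.headD_cons, List.set_cons_zero, hq2, hmsU]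
      rw [show ((t.drop 1 ++ [m0.getLastD 0]) :: (msU ++ [b]))
            = ((t.drop 1 ++ [m0.getLastD 0]) :: msU) ++ [b] by simp]
      rw [pvGetLastDConcat]
      rw [pvSetLast _ (by simp) _, List.dropLast_concat]
      rw [List.cons_append]
      rw [show (match (t.drop 1 ++ [m0.getLastD 0]) :: (msU ++ [0 :: b.dropLast]) with
            | [] => ([] : List (List Int))
            | x :: rest => x :: pvColDownHeadAuxA (x.headD 0) rest)
          = (t.drop 1 ++ [m0.getLastD 0]) ::
              pvColDownHeadAuxA ((t.drop 1 ++ [m0.getLastD 0]).headD 0)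
                (msU ++ [0 :: b.dropLast]) from rfl]
      rw [pvColDownHeadAuxA_char]
      rw [List.map_append, hmsUhead,
        show (List.map (fun r => r.headD 0) [(0:Int) :: b.dropLast]) = [(0:Int)] by simp]
      obtain ⟨w0, ws', hws0⟩ : ∃ w0 ws', ws = w0 :: ws' := by
        cases hws' : ws with
        | nil => rw [hws'] at hwsLen; simp [hmsdef] at hwsLen
        | cons a l => exact ⟨a, l, rfl⟩
      have hmsU0 : msU = (m0.set (m0.length - 1) w0)
          :: List.zipWith (fun m w => m.set (m.length - 1) w) ms' ws' := by
        rw [hmsUdef, hmsdef, hws0, List.zipWith_cons_cons]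
      rw [hmsU0]
      simp only [List.cons_append, List.zipWith_cons_cons, List.set_cons_succ,
        List.set_cons_zero, List.getD_cons_succ, List.getD_cons_zero]
      rw [List.set_set]
      rw [show (((m0.set (m0.length - 1) w0).set 0 tl) ::
               (List.zipWith (fun m w => m.set 0 w)
                 (List.zipWith (fun m w => m.set (m.length - 1) w) ms' ws'
                   ++ [(0:Int) :: b.dropLast])
                 (Mh ++ [(0:Int)])))
          = List.zipWith (fun m w => m.set 0 w)
              (((m0.set (m0.length - 1) w0)
                  :: List.zipWith (fun m w => m.set (m.length - 1) w) ms' ws')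
                ++ [(0:Int) :: b.dropLast])
              ((tl :: Mh) ++ [(0:Int)]) by simp]
      rw [← hmsU0, show (tl :: Mh) ++ [(0:Int)] = tl :: (Mh ++ [(0:Int)]) by simp, hcomp tl]
      rw [List.zipWith_append (by simp [hmsULen, hMhLen, hmsdef])]
      rw [show List.zipWith (fun m w => m.set 0 w)
              [(0:Int) :: b.dropLast] [Mh.getLastD 0, (0:Int)]
            = [Mh.getLastD 0 :: b.dropLast] from rfl]
      rw [hmsUdef, pvMidsEq' ms (tl :: Mh.dropLast) ws h2r]
    rw [hlhs]
    -- ===== RHS =====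
    have hMh'rev : Mh.reverse ≠ [] := by simp [hMh, hmsdef]
    have hMlne : Ml ≠ [] := by simp [hMl, hmsdef]
    have hrgdef : pvRing t b ms = t ++ (Ml ++ (b.reverse ++ Mh.reverse)) := by
      simp [pvRing, hMl, hMh]
    have hrot : (pvRing t b ms).rotate 1
        = t.drop 1 ++ (Ml ++ (b.reverse ++ (Mh.reverse ++ [tl]))) := by
      rw [hrgdef, pvRotOneNe _ (by simp [htne]) 0,
        List.drop_append_of_le_length (by omega), pvHeadDAppend _ _ htne]
      simp [htl]
    rw [hrot]
    simp only [pvRebuild, Nat.add_sub_cancel]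
    have hTop := (pvSeg2 (t.drop 1) (Ml ++ (b.reverse ++ (Mh.reverse ++ [tl]))) C
      (by rw [List.length_drop, ht]; omega) (by simp [hMlne])).1
    have hDrop1 := (pvSeg2 (t.drop 1) (Ml ++ (b.reverse ++ (Mh.reverse ++ [tl]))) C
      (by rw [List.length_drop, ht]; omega) (by simp [hMlne])).2
    rw [hTop, hDrop1]
    rw [pvHeadDAppend _ _ hMlne 0,
      show Ml.headD 0 = m0.getLastD 0 by simp [hMl, hmsdef]]
    have hRight := (pvSeg2 (Ml.drop 1) (b.reverse ++ (Mh.reverse ++ [tl])) ms.length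
      (by simp [hMl, hmsdef]) (by simp [hbne])).1
    have hDrop2 := (pvSeg2 (Ml.drop 1) (b.reverse ++ (Mh.reverse ++ [tl])) ms.length
      (by simp [hMl, hmsdef]) (by simp [hbne])).2
    rw [List.drop_append_of_le_length (show 1 ≤ Ml.length by
      simp [hMl, hmsdef])]
    rw [hRight]
    rw [pvHeadDAppend _ _ (by simp [hbne]) 0, pvHeadDRev _ hbne 0]
    rw [show (t.drop 1 ++ (Ml ++ (b.reverse ++ (Mh.reverse ++ [tl])))).drop (C + ms.length)
          = b.reverse.drop 1 ++ (Mh.reverse ++ [tl]) by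
        rw [← List.drop_drop, hDrop1,
          List.drop_append_of_le_length (show 1 ≤ Ml.length by simp [hMl, hmsdef]), hDrop2,
          List.drop_append_of_le_length (show 1 ≤ b.reverse.length by
            rw [List.length_reverse, hb]; omega)]]
    have hBot := (pvSeg2 (b.reverse.drop 1) (Mh.reverse ++ [tl]) C
      (by rw [List.length_drop, List.length_reverse, hb]; omega) (by simp)).1
    have hDrop3 := (pvSeg2 (b.reverse.drop 1) (Mh.reverse ++ [tl]) C
      (by rw [List.length_drop, List.length_reverse, hb]; omega) (by simp)).2
    rw [hBot]
    rw [pvHeadDAppend _ _ hMh'rev 0, pvHeadDRev _ hMhne 0]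
    rw [show (t.drop 1 ++ (Ml ++ (b.reverse ++ (Mh.reverse ++ [tl])))).drop (C + ms.length + C)
          = Mh.reverse.drop 1 ++ [tl] by
        rw [← List.drop_drop (j := C + ms.length), ← List.drop_drop, hDrop1,
          List.drop_append_of_le_length (show 1 ≤ Ml.length by simp [hMl, hmsdef]),
          hDrop2,
          List.drop_append_of_le_length (show 1 ≤ b.reverse.length by
            rw [List.length_reverse, hb]; omega),
          hDrop3,
          List.drop_append_of_le_length (show 1 ≤ Mh.reverse.length by
            simp [hMh, hmsdef])]]
    rw [pvDropOneReverse _ hbne, pvDropOneReverse _ hMhne]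
    rw [List.reverse_append, List.reverse_append]
    simp only [List.reverse_cons, List.reverse_nil, List.nil_append, List.reverse_reverse,
      List.singleton_append]
    rw [pvZipWith_zip_eq_zip3 (fun l m w => l :: ((m.drop 1).dropLast ++ [w]))
      (tl :: Mh.dropLast) ms ((Ml.drop 1) ++ [b.getLastD 0])]
    rw [show Ml.drop 1 ++ [b.getLastD 0] = ws by simp [hMl, hws, hmsdef]]
    simp
-- ring reassembly
theorem pvReassemble {α : Type} (l : List α) (a b c : Nat) :
    l.take a ++ ((l.drop a).take b ++ ((l.drop (a + b)).take c ++ l.drop (a + b + c)))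
      = l := by
  have h1 : l.drop (a + b) = (l.drop a).drop b := by rw [List.drop_drop]
  have h2 : l.drop (a + b + c) = ((l.drop a).drop b).drop c := by
    rw [List.drop_drop, List.drop_drop]; ring_nf
  rw [h1, h2]
  rw [List.take_append_drop c ((l.drop a).drop b), List.take_append_drop b (l.drop a),
    List.take_append_drop a l]

theorem pvZip3Congr (f : Int → List Int → Int → List Int)
    (hf : ∀ l w m m', (m.drop 1).dropLast = (m'.drop 1).dropLast → f l m w = f l m' w) :
    ∀ (hs : List Int) (ms ms' : List (List Int)) (ws : List Int),
    ms.length = ms'.length →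
    ms.map (fun r => (r.drop 1).dropLast) = ms'.map (fun r => (r.drop 1).dropLast) →
    pvZip3 f hs ms ws = pvZip3 f hs ms' ws := by
  intro hs
  induction hs with
  | nil => intro ms ms' ws h1 h2; cases ms <;> cases ms' <;> simp_all <;> rfl
  | cons h hs ih =>
    intro ms ms' ws h1 h2
    cases ms with
    | nil => cases ms' with
             | nil => rfl
             | cons m' l' => simp at h1
    | cons m l =>
      cases ms' with
      | nil => simp at h1
      | cons m' l' =>
        cases ws with
        | nil => rfl
        | cons w ws' =>
          simp only [List.map_cons, List.cons.injEq] at h2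
          simp only [pvZip3]
          rw [hf h w m m' h2.1, ih l l' ws' (by simpa using h1) h2.2]

-- pvRebuild in three-zip normal form
theorem pvRebuildForm (C k : Nat) (ms : List (List Int)) (ring : List Int)
    (hk : k = ms.length) :
    pvRebuild C (k + 2) ms ring =
      (ring.take C) ::
        (pvZip3 (fun l m w => l :: ((m.drop 1).dropLast ++ [w]))
            ((ring.drop (C + k + C)).reverse) ms ((ring.drop C).take k)
          ++ [((ring.drop (C + k)).take C).reverse]) := by
  simp only [pvRebuild, Nat.add_sub_cancel]
  rw [pvZipWith_zip_eq_zip3 (fun l m w => l :: ((m.drop 1).dropLast ++ [w]))]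
  simp

theorem pvRebuildCongr (C R : Nat) (ms ms' : List (List Int)) (ring : List Int)
    (h1 : ms.length = ms'.length)
    (h2 : ms.map (fun r => (r.drop 1).dropLast) = ms'.map (fun r => (r.drop 1).dropLast)) :
    pvRebuild C R ms ring = pvRebuild C R ms' ring := by
  simp only [pvRebuild]
  rw [pvZipWith_zip_eq_zip3 (fun l m w => l :: ((m.drop 1).dropLast ++ [w])),
    pvZipWith_zip_eq_zip3 (fun l m w => l :: ((m.drop 1).dropLast ++ [w]))]
  rw [pvZip3Congr _ (by
      intro l w m m' hmm'
      simp only [hmm']) _ ms ms' _ h1 h2]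

-- lengths of the ring
theorem pvRingLen (C : Nat) (t b : List Int) (ms : List (List Int))
    (ht : t.length = C) (hb : b.length = C) :
    (pvRing t b ms).length = C + ms.length + C + ms.length := by
  simp [pvRing, ht, hb]; omega
theorem pvZip3Len (f : Int → List Int → Int → List Int) :
    ∀ (hs : List Int) (ms : List (List Int)) (ws : List Int),
    hs.length = ms.length → ws.length = ms.length →
    (pvZip3 f hs ms ws).length = ms.length := by
  intro hs
  induction hs with
  | nil => intro ms ws h1 h2; cases ms with
           | nil => rfl
           | cons m l => simp at h1
  | cons h hs ih =>
    intro ms ws h1 h2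
    cases ms with
    | nil => simp at h1
    | cons m l =>
      cases ws with
      | nil => simp at h2
      | cons w ws' =>
        simp only [pvZip3, List.length_cons]
        rw [ih l ws' (by simpa using h1) (by simpa using h2)]

theorem pvZip3Rows (C : Nat) (hC : 2 ≤ C) :
    ∀ (hs : List Int) (ms : List (List Int)) (ws : List Int),
    (∀ m ∈ ms, m.length = C) →
    ∀ x ∈ pvZip3 (fun l m w => l :: ((m.drop 1).dropLast ++ [w])) hs ms ws, x.length = C := by
  intro hs
  induction hs with
  | nil => intro ms ws _ x hx; cases ms <;> cases ws <;> simp [pvZip3] at hx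
  | cons h hs ih =>
    intro ms ws hms x hx
    cases ms with
    | nil => simp [pvZip3] at hx
    | cons m l =>
      cases ws with
      | nil => simp [pvZip3] at hx
      | cons w ws' =>
        simp only [pvZip3, List.mem_cons] at hx
        rcases hx with hx | hx
        · subst hx
          have hm := hms m (by simp)
          simp [hm]
          omega
        · exact ih l ws' (fun y hy => hms y (by simp [hy])) x hx

theorem pvRingOfRebuild (C k : Nat) (ms : List (List Int)) (ring : List Int)
    (hk : k = ms.length) (hlen : ring.length = C + k + C + k) :
    pvRing (ring.take C) (((ring.drop (C + k)).take C).reverse)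
      (pvZip3 (fun l m w => l :: ((m.drop 1).dropLast ++ [w]))
        ((ring.drop (C + k + C)).reverse) ms ((ring.drop C).take k)) = ring := by
  have hleft : ((ring.drop (C + k + C)).reverse).length = k := by
    rw [List.length_reverse, List.length_drop, hlen]
    omega
  have hright : ((ring.drop C).take k).length = k := by
    rw [List.length_take, List.length_drop, hlen]
    omega
  rw [pvRing]
  rw [pvZip3MapLast _ (fun l m w => by
        rw [List.getLastD_cons, pvGetLastDConcat])
      _ _ _ (by rw [hleft, hk]) (by rw [hright, hk])]
  rw [pvZip3MapHead _ (fun l m w => rfl) _ _ _ (by rw [hleft, hk]) (by rw [hright, hk])]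
  rw [List.reverse_reverse, List.reverse_reverse]
  rw [List.append_assoc, List.append_assoc]
  exact pvReassemble ring C k C

theorem pvRebuildOfRing (C : Nat) (hC : 2 ≤ C) (t b : List Int) (ms : List (List Int))
    (ht : t.length = C) (hb : b.length = C) (hms : ∀ m ∈ ms, m.length = C) :
    pvRebuild C (ms.length + 2) ms (pvRing t b ms) = t :: (ms ++ [b]) := by
  rw [pvRebuildForm C ms.length ms _ rfl]
  have hMl : (List.map (fun (r : List Int) => r.getLastD 0) ms).length = ms.length := by simp
  have hMh : (List.map (fun (r : List Int) => r.headD 0) ms).length = ms.length := by simp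
  have h1 : (pvRing t b ms).take C = t := by
    rw [pvRing, List.append_assoc, List.append_assoc, List.take_left' ht]
  have hdropC : (pvRing t b ms).drop C
      = List.map (fun (r : List Int) => r.getLastD 0) ms
        ++ (b.reverse ++ (List.map (fun (r : List Int) => r.headD 0) ms).reverse) := by
    rw [pvRing, List.append_assoc, List.append_assoc, List.drop_left' ht]
  have h2 : ((pvRing t b ms).drop C).take ms.length
      = List.map (fun (r : List Int) => r.getLastD 0) ms := by
    rw [hdropC, List.take_left' hMl]
  have hdropCk : (pvRing t b ms).drop (C + ms.length)
      = b.reverse ++ (List.map (fun (r : List Int) => r.headD 0) ms).reverse := by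
    rw [← List.drop_drop, hdropC, List.drop_left' hMl]
  have h3 : (((pvRing t b ms).drop (C + ms.length)).take C).reverse = b := by
    rw [hdropCk, List.take_left' (by simp [hb]), List.reverse_reverse]
  have h4 : ((pvRing t b ms).drop (C + ms.length + C)).reverse
      = List.map (fun (r : List Int) => r.headD 0) ms := by
    rw [← List.drop_drop, hdropCk, List.drop_left' (by simp [hb]), List.reverse_reverse]
  rw [h1, h2, h3, h4]
  rw [pvZip3Recon ms (fun m hm => (hms m hm) ▸ hC)]
theorem pvIterCW (C : Nat) (hC : 2 ≤ C) (t b : List Int) (ms : List (List Int))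
    (ht : t.length = C) (hb : b.length = C) (hms : ∀ m ∈ ms, m.length = C) :
    ∀ n : Nat, pvStepCW^[n] (t :: (ms ++ [b])) =
      pvRebuild C (ms.length + 2) ms
        ((pvRing t b ms).rotate (n * (2 * C + 2 * ms.length - 1))) := by
  intro n
  induction n with
  | zero =>
    simp only [Function.iterate_zero, id_eq, Nat.zero_mul, List.rotate_zero]
    exact (pvRebuildOfRing C hC t b ms ht hb hms).symm
  | succ n ih =>
    rw [Function.iterate_succ_apply', ih]
    have hlen : ((pvRing t b ms).rotate (n * (2 * C + 2 * ms.length - 1))).length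
        = C + ms.length + C + ms.length := by
      rw [List.length_rotate, pvRingLen C t b ms ht hb]
    set rg := (pvRing t b ms).rotate (n * (2 * C + 2 * ms.length - 1)) with hrg
    rw [pvRebuildForm C ms.length ms rg rfl]
    set T := rg.take C with hT
    set B := ((rg.drop (C + ms.length)).take C).reverse with hB
    set M := pvZip3 (fun l m w => l :: ((m.drop 1).dropLast ++ [w]))
      ((rg.drop (C + ms.length + C)).reverse) ms ((rg.drop C).take ms.length) with hM
    have hleftlen : ((rg.drop (C + ms.length + C)).reverse).length = ms.length := by
      rw [List.length_reverse, List.length_drop, hlen]; omega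
    have hrightlen : ((rg.drop C).take ms.length).length = ms.length := by
      rw [List.length_take, List.length_drop, hlen]; omega
    have hMlen : M.length = ms.length := by
      rw [hM]; exact pvZip3Len _ _ _ _ hleftlen hrightlen
    have hTlen : T.length = C := by rw [hT, List.length_take, hlen]; omega
    have hBlen : B.length = C := by
      rw [hB, List.length_reverse, List.length_take, List.length_drop, hlen]; omega
    have hMrows : ∀ m ∈ M, m.length = C := by
      rw [hM]
      exact pvZip3Rows C hC _ ms _ hms
    have hstep := pvStepCW_eq C hC T B M hTlen hBlen hMrows
    rw [hstep, hMlen]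
    rw [show pvRing T B M = rg from by
      rw [hT, hB, hM]
      exact pvRingOfRebuild C ms.length ms rg rfl hlen]
    rw [pvRebuildCongr C (ms.length + 2) M ms _ hMlen (by
      rw [hM]
      exact pvZip3MapInterior _ ms _ hleftlen hrightlen)]
    rw [hrg, List.rotate_rotate]
    ring_nf

theorem pvIterCCW (C : Nat) (hC : 2 ≤ C) (t b : List Int) (ms : List (List Int))
    (ht : t.length = C) (hb : b.length = C) (hms : ∀ m ∈ ms, m.length = C) :
    ∀ n : Nat, pvStepCCW^[n] (t :: (ms ++ [b])) =
      pvRebuild C (ms.length + 2) ms ((pvRing t b ms).rotate n) := by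
  intro n
  induction n with
  | zero =>
    simp only [Function.iterate_zero, id_eq, List.rotate_zero]
    exact (pvRebuildOfRing C hC t b ms ht hb hms).symm
  | succ n ih =>
    rw [Function.iterate_succ_apply', ih]
    have hlen : ((pvRing t b ms).rotate n).length = C + ms.length + C + ms.length := by
      rw [List.length_rotate, pvRingLen C t b ms ht hb]
    set rg := (pvRing t b ms).rotate n with hrg
    rw [pvRebuildForm C ms.length ms rg rfl]
    set T := rg.take C with hT
    set B := ((rg.drop (C + ms.length)).take C).reverse with hB
    set M := pvZip3 (fun l m w => l :: ((m.drop 1).dropLast ++ [w]))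
      ((rg.drop (C + ms.length + C)).reverse) ms ((rg.drop C).take ms.length) with hM
    have hleftlen : ((rg.drop (C + ms.length + C)).reverse).length = ms.length := by
      rw [List.length_reverse, List.length_drop, hlen]; omega
    have hrightlen : ((rg.drop C).take ms.length).length = ms.length := by
      rw [List.length_take, List.length_drop, hlen]; omega
    have hMlen : M.length = ms.length := by
      rw [hM]; exact pvZip3Len _ _ _ _ hleftlen hrightlen
    have hTlen : T.length = C := by rw [hT, List.length_take, hlen]; omega
    have hBlen : B.length = C := by
      rw [hB, List.length_reverse, List.length_take, List.length_drop, hlen]; omega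
    have hMrows : ∀ m ∈ M, m.length = C := by
      rw [hM]
      exact pvZip3Rows C hC _ ms _ hms
    have hstep := pvStepCCW_eq C hC T B M hTlen hBlen hMrows
    rw [hstep, hMlen]
    rw [show pvRing T B M = rg from by
      rw [hT, hB, hM]
      exact pvRingOfRebuild C ms.length ms rg rfl hlen]
    rw [pvRebuildCongr C (ms.length + 2) M ms _ hMlen (by
      rw [hM]
      exact pvZip3MapInterior _ ms _ hleftlen hrightlen)]
    rw [hrg, List.rotate_rotate]
theorem pvIterRot : ∀ (n : Nat) (l : List (List Int)), l ≠ [] →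
    pvRotRowA^[n] l = l.rotate (n * (l.length - 1)) := by
  intro n
  induction n with
  | zero => intro l _; simp
  | succ n ih =>
    intro l hne
    rw [Function.iterate_succ_apply', ih l hne]
    rw [show pvRotRowA (l.rotate (n * (l.length - 1)))
          = (l.rotate (n * (l.length - 1))).rotate ((l.rotate (n * (l.length - 1))).length - 1)
        from by
      rw [pvRotLast _ (by simpa using hne) []]
      rfl]
    rw [List.length_rotate, List.rotate_rotate]
    congr 1
    ring

theorem pvModMulArith (j R : Nat) (h1 : 1 ≤ j) (h2 : j < R) :
    (j * (R - 1)) % R = R - j := by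
  obtain ⟨j', rfl⟩ : ∃ j', j = j' + 1 := ⟨j - 1, by omega⟩
  obtain ⟨R', rfl⟩ : ∃ R', R = R' + 1 := ⟨R - 1, by omega⟩
  have key : (j' + 1) * (R' + 1 - 1) = (R' + 1 - (j' + 1)) + j' * (R' + 1) := by
    rw [Nat.succ_mul, Nat.mul_succ, Nat.add_sub_cancel]
    generalize j' * R' = p
    omega
  rw [key, Nat.add_mul_mod_self_right, Nat.mod_eq_of_lt (by omega)]

-- one ShiftRow operation: A's repeated pop/insert = B's slicing
theorem pvShiftEq (g : List (List Int)) (hne : g ≠ []) (cnt : Int) :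
    pvRotRowA^[(PySem.Int.mod cnt (g.length : Int)).toNat] g
      = g.drop (g.length - (PySem.Int.mod cnt (g.length : Int)).toNat)
        ++ g.take (g.length - (PySem.Int.mod cnt (g.length : Int)).toNat) := by
  have hRpos : (0:Int) < (g.length : Int) := by
    cases g with
    | nil => simp at hne
    | cons a l => simp
  have hlt : (PySem.Int.mod cnt (g.length : Int)).toNat < g.length := by
    have := PySem.Int.mod_lt (a := cnt) (b := (g.length : Int)) hRpos
    omega
  set j := (PySem.Int.mod cnt (g.length : Int)).toNat with hj
  rw [pvIterRot _ g hne]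
  rcases Nat.eq_zero_or_pos j with hj0 | hjpos
  · rw [hj0]
    simp
  · rw [← List.rotate_mod, pvModMulArith j g.length hjpos hlt,
      List.rotate_eq_drop_append_take (by omega)]
theorem pvDecomp (g : List (List Int)) (h2 : 2 ≤ g.length) :
    g = (g.headD []) :: (((g.drop 1).dropLast) ++ [g.getLastD []]) := by
  cases g with
  | nil => simp at h2
  | cons a l =>
    have hlne : l ≠ [] := by
      intro he; subst he; simp at h2
    simp only [List.headD_cons, List.drop_succ_cons, List.drop_zero, List.cons.injEq, true_and]
    rw [show (a :: l).getLastD [] = l.getLastD a from List.getLastD_cons .., ]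
    rw [show l.getLastD a = l.getLast hlne by
      rw [List.getLastD_eq_getLast?, List.getLast?_eq_some_getLast hlne]; rfl]
    exact (List.dropLast_append_getLast hlne).symm

-- one rotation operation (opr ≠ 'ShiftRow'): A's single steps = B's net rotation
theorem pvRotOpEq (C R : Nat) (hC : 2 ≤ C) (hR : 2 ≤ R)
    (t b : List Int) (ms : List (List Int))
    (ht : t.length = C) (hb : b.length = C) (hms : ∀ m ∈ ms, m.length = C)
    (hmsR : ms.length + 2 = R) (cnt : Int) :
    (let cntImpl := PySem.Int.mod cnt (2 * (R:Int) + 2 * (C:Int) - 4)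
     if cntImpl < PySem.Int.floordiv (2 * (R:Int) + 2 * (C:Int) - 4) 2 then
       pvStepCW^[cntImpl.toNat] (t :: (ms ++ [b]))
     else
       pvStepCCW^[((2 * (R:Int) + 2 * (C:Int) - 4) - cntImpl).toNat] (t :: (ms ++ [b])))
    = pvRebuild C R ms
        ((pvRing t b ms).drop ((2 * (R:Int) + 2 * (C:Int) - 4
            - PySem.Int.mod cnt (2 * (R:Int) + 2 * (C:Int) - 4)).toNat)
          ++ (pvRing t b ms).take ((2 * (R:Int) + 2 * (C:Int) - 4
            - PySem.Int.mod cnt (2 * (R:Int) + 2 * (C:Int) - 4)).toNat)) := by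
  have hEN : (2 * (R:Int) + 2 * (C:Int) - 4) = ((2 * C + 2 * ms.length : Nat) : Int) := by
    push_cast
    omega
  have hENpos : (0:Int) < 2 * (R:Int) + 2 * (C:Int) - 4 := by
    push_cast
    omega
  have hk0 : (0:Int) ≤ PySem.Int.mod cnt (2 * (R:Int) + 2 * (C:Int) - 4) :=
    PySem.Int.mod_nonneg _ hENpos
  have hklt : PySem.Int.mod cnt (2 * (R:Int) + 2 * (C:Int) - 4)
      < 2 * (R:Int) + 2 * (C:Int) - 4 := PySem.Int.mod_lt _ hENpos
  set kI := PySem.Int.mod cnt (2 * (R:Int) + 2 * (C:Int) - 4) with hkI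
  set EN : Nat := 2 * C + 2 * ms.length with hENdef
  have hENI : (2 * (R:Int) + 2 * (C:Int) - 4) = (EN : Int) := hEN
  have hkN : kI.toNat < EN := by omega
  have hringlen : (pvRing t b ms).length = EN := by
    rw [pvRingLen C t b ms ht hb]; omega
  have hjN : ((2 * (R:Int) + 2 * (C:Int) - 4) - kI).toNat = EN - kI.toNat := by omega
  have hsplit : (pvRing t b ms).drop (EN - kI.toNat) ++ (pvRing t b ms).take (EN - kI.toNat)
      = (pvRing t b ms).rotate (EN - kI.toNat) := by
    rw [List.rotate_eq_drop_append_take (by omega)]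
  have hRB : pvRebuild C R ms = pvRebuild C (ms.length + 2) ms := by rw [hmsR]
  rcases Nat.eq_zero_or_pos kI.toNat with hz | hpos
  · -- cnt % E = 0 : both sides are the unrotated grid
    have hcond : kI < PySem.Int.floordiv (2 * (R:Int) + 2 * (C:Int) - 4) 2 := by
      have h2' : PySem.Int.floordiv (2 * (R:Int) + 2 * (C:Int) - 4) 2
          = (2 * (R:Int) + 2 * (C:Int) - 4) / 2 := PySem.Int.floordiv_eq_ediv_of_pos (by omega)
      rw [h2']
      have : kI = 0 := by omega
      rw [this]
      push_cast
      omega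
    simp only [hcond, if_pos]
    rw [hz, Function.iterate_zero, id_eq, hjN, hz, Nat.sub_zero, hRB]
    rw [show (pvRing t b ms).drop EN ++ (pvRing t b ms).take EN = pvRing t b ms by
      rw [List.drop_of_length_le (by omega), List.take_of_length_le (by omega)]
      simp]
    exact (pvRebuildOfRing C hC t b ms ht hb hms).symm
  · rw [hjN, hsplit, hRB]
    by_cases hcond : kI < PySem.Int.floordiv (2 * (R:Int) + 2 * (C:Int) - 4) 2
    · simp only [hcond, if_pos]
      rw [pvIterCW C hC t b ms ht hb hms kI.toNat]
      congr 1
      conv_lhs => rw [← List.rotate_mod]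
      rw [hringlen, pvModMulArith kI.toNat EN hpos hkN]
    · simp only [hcond, if_neg, not_false_iff]
      rw [pvIterCCW C hC t b ms ht hb hms _]
      rw [hjN]
theorem pvRebuildProper (C k : Nat) (ms : List (List Int)) (ring : List Int)
    (hC : 2 ≤ C) (hk : k = ms.length) (hms : ∀ m ∈ ms, m.length = C)
    (hlen : ring.length = C + k + C + k) :
    (pvRebuild C (k + 2) ms ring).length = k + 2 ∧
      ∀ row ∈ pvRebuild C (k + 2) ms ring, row.length = C := by
  rw [pvRebuildForm C k ms ring hk]
  have hleftlen : ((ring.drop (C + k + C)).reverse).length = ms.length := by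
    rw [List.length_reverse, List.length_drop, hlen]; omega
  have hrightlen : ((ring.drop C).take k).length = ms.length := by
    rw [List.length_take, List.length_drop, hlen]; omega
  have hzlen := pvZip3Len (fun l m w => l :: ((m.drop 1).dropLast ++ [w]))
    ((ring.drop (C + k + C)).reverse) ms ((ring.drop C).take k)
    hleftlen hrightlen
  constructor
  · rw [List.length_cons, List.length_append, hzlen, hk]
    simp
  · intro row hrow
    simp only [List.mem_cons, List.mem_append] at hrow
    rcases hrow with h | h | h | h
    · rw [h, List.length_take, hlen]; omega
    · exact pvZip3Rows C hC _ ms _ hms row h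
    · rw [h, List.length_reverse, List.length_take, List.length_drop, hlen]
      omega
    · simp at h

theorem pvOpEq (C R : Nat) (hC : 2 ≤ C) (hR : 2 ≤ R) (g : List (List Int))
    (hlen : g.length = R) (hrows : ∀ row ∈ g, row.length = C) (op : String × Int) :
    pvApplyOpA (R:Int) (2 * (R:Int) + 2 * (C:Int) - 4) g op
        = pvApplyOpB R C (2 * (R:Int) + 2 * (C:Int) - 4) g op
      ∧ (pvApplyOpB R C (2 * (R:Int) + 2 * (C:Int) - 4) g op).length = R
      ∧ ∀ row ∈ pvApplyOpB R C (2 * (R:Int) + 2 * (C:Int) - 4) g op, row.length = C := by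
  have hgne : g ≠ [] := by
    intro he; rw [he] at hlen; simp at hlen; omega
  by_cases hop : op.1 = "ShiftRow"
  · have hA : pvApplyOpA (R:Int) (2 * (R:Int) + 2 * (C:Int) - 4) g op
        = pvRotRowA^[(PySem.Int.mod op.2 (R:Int)).toNat] g := by
      simp only [pvApplyOpA]
      rw [if_pos hop]
    have hB : pvApplyOpB R C (2 * (R:Int) + 2 * (C:Int) - 4) g op
        = g.drop (R - (PySem.Int.mod op.2 (R:Int)).toNat)
          ++ g.take (R - (PySem.Int.mod op.2 (R:Int)).toNat) := by
      simp only [pvApplyOpB]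
      rw [if_pos hop]
    have hAB := pvShiftEq g hgne op.2
    rw [hlen] at hAB
    refine ⟨by rw [hA, hB, hAB], ?_, ?_⟩
    · rw [hB, List.length_append, List.length_drop, List.length_take, hlen]
      have hj : (PySem.Int.mod op.2 (R:Int)).toNat < R := by
        have h1 := PySem.Int.mod_lt (a := op.2) (b := (R:Int)) (by positivity)
        have h2 := PySem.Int.mod_nonneg (a := op.2) (b := (R:Int)) (by positivity)
        omega
      omega
    · intro row hrow
      rw [hB] at hrow
      rcases List.mem_append.1 hrow with h | h
      · exact hrows row (List.mem_of_mem_drop h)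
      · exact hrows row (List.mem_of_mem_take h)
  · have hdec := pvDecomp g (by omega)
    set t := g.headD [] with hT
    set b := g.getLastD [] with hB2
    set ms := (g.drop 1).dropLast with hM
    have hmslen : ms.length + 2 = R := by
      have := congrArg List.length hdec
      simp at this
      omega
    have htlen : t.length = C := hrows t (by rw [hdec]; simp)
    have hblen : b.length = C := hrows b (by rw [hdec]; simp)
    have hmsrows : ∀ m ∈ ms, m.length = C := by
      intro m hm
      exact hrows m (by rw [hdec]; simp [hm])
    have hrot := pvRotOpEq C R hC hR t b ms htlen hblen hmsrows hmslen op.2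
    simp only at hrot
    have hA : pvApplyOpA (R:Int) (2 * (R:Int) + 2 * (C:Int) - 4) g op
        = pvRebuild C R ms
            ((pvRing t b ms).drop ((2 * (R:Int) + 2 * (C:Int) - 4
                - PySem.Int.mod op.2 (2 * (R:Int) + 2 * (C:Int) - 4)).toNat)
              ++ (pvRing t b ms).take ((2 * (R:Int) + 2 * (C:Int) - 4
                - PySem.Int.mod op.2 (2 * (R:Int) + 2 * (C:Int) - 4)).toNat)) := by
      simp only [pvApplyOpA]
      rw [if_neg hop]
      conv_lhs => rw [hdec]
      exact hrot
    have hBdef : pvApplyOpB R C (2 * (R:Int) + 2 * (C:Int) - 4) g op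
        = pvRebuild C R ms
            ((pvRing t b ms).drop ((2 * (R:Int) + 2 * (C:Int) - 4
                - PySem.Int.mod op.2 (2 * (R:Int) + 2 * (C:Int) - 4)).toNat)
              ++ (pvRing t b ms).take ((2 * (R:Int) + 2 * (C:Int) - 4
                - PySem.Int.mod op.2 (2 * (R:Int) + 2 * (C:Int) - 4)).toNat)) := by
      simp only [pvApplyOpB]
      rw [if_neg hop]
    have hring2len : ((pvRing t b ms).drop ((2 * (R:Int) + 2 * (C:Int) - 4
            - PySem.Int.mod op.2 (2 * (R:Int) + 2 * (C:Int) - 4)).toNat)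
          ++ (pvRing t b ms).take ((2 * (R:Int) + 2 * (C:Int) - 4
            - PySem.Int.mod op.2 (2 * (R:Int) + 2 * (C:Int) - 4)).toNat)).length
        = C + ms.length + C + ms.length := by
      rw [List.length_append, List.length_drop, List.length_take,
        pvRingLen C t b ms htlen hblen]
      omega
    have hprop := pvRebuildProper C ms.length ms _ hC rfl hmsrows hring2len
    rw [hmslen] at hprop
    refine ⟨by rw [hA, hBdef], ?_, ?_⟩
    · rw [hBdef]; exact hprop.1
    · rw [hBdef]; exact hprop.2
theorem pvFoldProper (C R : Nat) (hC : 2 ≤ C) (hR : 2 ≤ R) :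
    ∀ (ops : List (String × Int)) (g : List (List Int)),
    g.length = R → (∀ row ∈ g, row.length = C) →
    ops.foldl (pvApplyOpA (R:Int) (2 * (R:Int) + 2 * (C:Int) - 4)) g
      = ops.foldl (pvApplyOpB R C (2 * (R:Int) + 2 * (C:Int) - 4)) g := by
  intro ops
  induction ops with
  | nil => intro g _ _; rfl
  | cons op ops ih =>
    intro g hlen hrows
    simp only [List.foldl_cons]
    have h := pvOpEq C R hC hR g hlen hrows op
    rw [h.1]
    exact ih _ h.2.1 h.2.2

theorem pvFoldShift (RN : Nat) (CN : Nat) (EI EI' : Int) :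
    ∀ (ops : List (String × Int)) (g : List (List Int)),
    g ≠ [] → g.length = RN → (∀ op ∈ ops, op.1 = "ShiftRow") →
    ops.foldl (pvApplyOpA (RN:Int) EI) g = ops.foldl (pvApplyOpB RN CN EI') g := by
  intro ops
  induction ops with
  | nil => intro g _ _ _; rfl
  | cons op ops ih =>
    intro g hne hlen hall
    have hop := hall op (by simp)
    simp only [List.foldl_cons]
    have hA : pvApplyOpA (RN:Int) EI g op
        = pvRotRowA^[(PySem.Int.mod op.2 (RN:Int)).toNat] g := by
      simp only [pvApplyOpA]; rw [if_pos hop]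
    have hB : pvApplyOpB RN CN EI' g op
        = g.drop (RN - (PySem.Int.mod op.2 (RN:Int)).toNat)
          ++ g.take (RN - (PySem.Int.mod op.2 (RN:Int)).toNat) := by
      simp only [pvApplyOpB]; rw [if_pos hop]
    have hAB := pvShiftEq g hne op.2
    rw [hlen] at hAB
    rw [hA, hB, hAB]
    have hlen2 : (g.drop (RN - (PySem.Int.mod op.2 (RN:Int)).toNat)
        ++ g.take (RN - (PySem.Int.mod op.2 (RN:Int)).toNat)).length = RN := by
      rw [List.length_append, List.length_drop, List.length_take, hlen]
      omega
    have hne2 : (g.drop (RN - (PySem.Int.mod op.2 (RN:Int)).toNat)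
        ++ g.take (RN - (PySem.Int.mod op.2 (RN:Int)).toNat)) ≠ [] := by
      intro he
      have h0 := congrArg List.length he
      rw [hlen2] at h0
      simp at h0
      rw [h0] at hlen
      exact hne (List.length_eq_zero_iff.mp hlen)
    exact ih _ hne2 hlen2 (fun o ho => hall o (by simp [ho]))

-- ===== VERDICT (by name: the statement is the Claim_ definition above) =====
theorem solution_C_spec : Claim_equal_solution_C := by
  intro rc ops _hdom hpre
  obtain ⟨hne, hcase⟩ := hpre
  show solution_C rc ops = solution_C_alt rc ops
  simp only [solution_C, solution_C_alt]
  rcases hcase with hshift | ⟨hR, hC, hrect⟩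
  · exact pvFoldShift rc.length ((rc.headD []).length) _ _ ops rc hne rfl hshift
  · exact pvFoldProper ((rc.headD []).length) rc.length hC hR ops rc rfl hrect
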